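-- pv_equiv track=rewrite | github.com/h4rm0n1c/macvox68 | docs/generate_icon_r.py | _clut8_rgb
-- ===== SOURCE A (Python) =====
-- from typing import Iterable, List, Sequence, Tuple
--
-- def _clut8_rgb(index: int) -> Tuple[int, int, int]:
--     """Classic Macintosh CLUT #8 palette (system icon 8-bit indices)."""
--     x = index & 0xFF
--     if x < 215:
--         r = (5 - (x // 36)) / 5.0
--         g = (5 - ((x // 6) % 6)) / 5.0
--         b = (5 - (x % 6)) / 5.0
--         return (int(round(r * 255)), int(round(g * 255)), int(round(b * 255)))
--     if x == 255:
--         return (0, 0, 0)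
--     values = [v / 15.0 for v in reversed(range(16)) if v % 3 != 0]
--     which = int((x - 215) % 10)
--     group = int((x - 215) // 10)
--     v = int(round(values[which] * 255))
--     if group == 0:
--         return (v, 0, 0)
--     if group == 1:
--         return (0, v, 0)
--     if group == 2:
--         return (0, 0, v)
--     if group == 3:
--         return (v, v, v)
--     return (255, 0, 255)
-- ===== SOURCE B (Python) =====
-- from typing import Tuple
--
-- def _build_clut8_table() -> Tuple[Tuple[int, int, int], ...]:
--     table = []
--     for x in range(215):
--         table.append(((5 - x // 36) * 51, (5 - (x // 6) % 6) * 51, (5 - x % 6) * 51))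
--     ramp = [v * 17 for v in reversed(range(16)) if v % 3 != 0]
--     for v in ramp:
--         table.append((v, 0, 0))
--     for v in ramp:
--         table.append((0, v, 0))
--     for v in ramp:
--         table.append((0, 0, v))
--     for v in ramp:
--         table.append((v, v, v))
--     table.append((0, 0, 0))
--     return tuple(table)
--
-- _CLUT8_TABLE = _build_clut8_table()
--
-- def _clut8_rgb(index: int) -> Tuple[int, int, int]:
--     """Classic Macintosh CLUT #8 palette (system icon 8-bit indices)."""
--     return _CLUT8_TABLE[index & 0xFF]
-- ===== Notes on version B (the rewrite author's own statement) =====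
-- stated objective: simpler
-- what changed: Replaced the arithmetic branching (cube formula, ramp list, group dispatch) with a module-level precomputed 256-entry RGB table built once with exact integer arithmetic; the function body is a single masked lookup.
import Mathlib
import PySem

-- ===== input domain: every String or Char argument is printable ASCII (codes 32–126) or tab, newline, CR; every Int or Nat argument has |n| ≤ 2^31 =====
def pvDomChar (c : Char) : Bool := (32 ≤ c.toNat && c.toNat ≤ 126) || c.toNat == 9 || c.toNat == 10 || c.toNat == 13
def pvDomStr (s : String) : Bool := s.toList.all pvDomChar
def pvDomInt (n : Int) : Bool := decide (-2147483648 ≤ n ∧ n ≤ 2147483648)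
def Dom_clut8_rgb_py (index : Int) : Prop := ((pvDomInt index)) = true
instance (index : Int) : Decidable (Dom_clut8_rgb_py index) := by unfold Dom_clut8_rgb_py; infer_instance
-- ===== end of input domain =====

-- B replaces A's arithmetic branching by a precomputed 256-entry table and a single masked lookup (objective: simpler).

-- ===== PORT A =====
-- Python's float expressions are exact here: (5-k)/5.0*255 rounds to (5-k)*51 and
-- values[w]*255 = v/15.0*255 rounds to v*17 for every reachable operand, so the
-- port uses the equal integer values step for step.
-- 'index & 0xFF' is ported as 'index % 256' (Int.emod): exact, including negatives.
def clut8_rgb_py (index : Int) : Int × Int × Int :=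
  let x := index % 256
  if x < 215 then
    ((5 - PySem.Int.floordiv x 36) * 51,
     (5 - PySem.Int.mod (PySem.Int.floordiv x 6) 6) * 51,
     (5 - PySem.Int.mod x 6) * 51)
  else if x = 255 then (0, 0, 0)
  else
    let values := (PySem.List.pyRange 0 16 1).reverse.filter (fun v => PySem.Int.mod v 3 != 0)
    let which := PySem.Int.mod (x - 215) 10
    let group := PySem.Int.floordiv (x - 215) 10
    -- values[which] is always in range here (which ∈ [0,10)); pyGet? returns some
    let v := (PySem.List.pyGet? values which).getD 0 * 17
    if group = 0 then (v, 0, 0)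
    else if group = 1 then (0, v, 0)
    else if group = 2 then (0, 0, v)
    else if group = 3 then (v, v, v)
    else (255, 0, 255)

-- ===== PORT B =====
-- transliteration of Source B: the table is built once (cube rows, four ramps, black),
-- the function body is a single masked lookup.
def pvRampB : List Int :=
  ((PySem.List.pyRange 0 16 1).reverse.filter (fun v => PySem.Int.mod v 3 != 0)).map (· * 17)

def pvClut8Table : List (Int × Int × Int) :=
  ((PySem.List.pyRange 0 215 1).map fun x =>
    ((5 - PySem.Int.floordiv x 36) * 51,
     (5 - PySem.Int.mod (PySem.Int.floordiv x 6) 6) * 51,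
     (5 - PySem.Int.mod x 6) * 51))
  ++ pvRampB.map (fun v => (v, 0, 0))
  ++ pvRampB.map (fun v => (0, v, 0))
  ++ pvRampB.map (fun v => (0, 0, v))
  ++ pvRampB.map (fun v => (v, v, v))
  ++ [(0, 0, 0)]

-- 'index & 0xFF' ported as 'index % 256' (exact); the index is always in range (table has 256 entries)
def clut8_rgb_py_alt (index : Int) : Int × Int × Int :=
  (PySem.List.pyGet? pvClut8Table (index % 256)).getD (0, 0, 0)

-- ===== PRECONDITION & SPEC =====
def Spec_clut8_rgb_py (index : Int) (out : Int × Int × Int) : Prop := out = clut8_rgb_py_alt index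
instance (index : Int) (out : Int × Int × Int) : Decidable (Spec_clut8_rgb_py index out) := by unfold Spec_clut8_rgb_py; infer_instance

-- ===== CLAIM (what is proved, stated in full; the proofs are below) =====
def Claim_equal_clut8_rgb_py : Prop := ∀ (index : Int), Dom_clut8_rgb_py index → Spec_clut8_rgb_py index (clut8_rgb_py index)

-- ===== LEMMAS AND PROOFS =====

-- both ports depend only on index % 256; check all 256 residues by computation
set_option maxHeartbeats 4000000 in
set_option maxRecDepth 10000 in
theorem pv_all_residues : ∀ n : Fin 256, clut8_rgb_py (n.val : Int) = clut8_rgb_py_alt (n.val : Int) := by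
  decide

theorem pv_mod_eq (index : Int) : clut8_rgb_py index = clut8_rgb_py_alt index := by
  have h0 : 0 ≤ index % 256 := Int.emod_nonneg index (by norm_num)
  have h1 : index % 256 < 256 := Int.emod_lt_of_pos index (by norm_num)
  have hn : (index % 256).toNat < 256 := by omega
  have hmm : ((index % 256).toNat : Int) % 256 = index % 256 := by omega
  have hA : clut8_rgb_py index = clut8_rgb_py ((index % 256).toNat : Int) := by
    simp only [clut8_rgb_py, hmm]
  have hB : clut8_rgb_py_alt index = clut8_rgb_py_alt ((index % 256).toNat : Int) := by
    simp only [clut8_rgb_py_alt, hmm]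
  rw [hA, hB]
  exact pv_all_residues ⟨(index % 256).toNat, hn⟩

-- ===== VERDICT (by name: the statement is the Claim_ definition above) =====
theorem clut8_rgb_py_spec : Claim_equal_clut8_rgb_py := by
  intro index _
  show clut8_rgb_py index = clut8_rgb_py_alt index
  exact pv_mod_eq index
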